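-- pv_equiv track=rewrite | github.com/schaffrx/Date_Parser | month_parse.py | get_day_month
-- ===== SOURCE A (Python) =====
-- def get_day_month(month_list: list) -> list:
--     """Parses the provided list to include only day_month strings
--
--     Parameters
--     ----------
--     month_list : list
--         A list of all months returned by the get_months function
--
--     Returns
--     -------
--     list
--         a list of all properly formatted day_month strings
--     """
--     day_month: list = []
--     day_list: list = str(list(range(1, 32)))
--     for month in month_list:
--         for day in day_list:
--             if day in month:
--                 day_month.append(month)
--     return(day_month)
-- ===== SOURCE B (Python) =====
-- def get_day_month(month_list: list) -> list:
--     """Same result as A, but the fixed day string is summarised once into a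
--     character-frequency table; each month is then appended count-weighted
--     in one multiplication instead of a 115-iteration inner scan."""
--     day_list = str(list(range(1, 32)))
--     counts = {}
--     for ch in day_list:
--         counts[ch] = counts.get(ch, 0) + 1
--     day_month = []
--     for month in month_list:
--         n = 0
--         for ch, cnt in counts.items():
--             if ch in month:
--                 n += cnt
--         day_month.extend([month] * n)
--     return day_month
-- ===== Notes on version B (the rewrite author's own statement) =====
-- stated objective: faster
-- what changed: A scans all 115 characters of str(list(range(1,32))) per month; B summarises that fixed string once into a character-frequency table (14 distinct chars) and appends each month count-weighted in a single extend.
import Mathlib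
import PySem

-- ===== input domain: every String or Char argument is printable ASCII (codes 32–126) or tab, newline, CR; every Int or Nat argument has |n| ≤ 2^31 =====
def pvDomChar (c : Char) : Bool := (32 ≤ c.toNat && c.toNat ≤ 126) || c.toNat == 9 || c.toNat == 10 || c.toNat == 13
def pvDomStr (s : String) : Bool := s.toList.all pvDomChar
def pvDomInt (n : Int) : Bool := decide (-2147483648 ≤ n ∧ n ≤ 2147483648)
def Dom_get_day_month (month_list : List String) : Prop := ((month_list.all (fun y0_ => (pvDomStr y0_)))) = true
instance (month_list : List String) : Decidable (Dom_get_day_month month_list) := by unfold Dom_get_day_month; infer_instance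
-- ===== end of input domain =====

-- B replaces A's 115-iteration inner scan per month by a character-frequency
-- table of the fixed string built once; each month is appended count-weighted
-- in a single extend. Objective: faster by a constant factor; same results.

-- str(list(range(1, 32))), the fixed string both Pythons compute:
-- Python's repr of a list of (non-negative) ints is exactly
-- "[" ++ ", ".join(str(n) for n in items) ++ "]" (ported by hand; exact here).
def pvDayChars : List Char :=
  ['['] ++ PySem.Chars.join [',', ' '] ((PySem.List.pyRange 1 32 1).map PySem.Int.toChars) ++ [']']

-- ===== PORT A =====
def get_day_month (month_list : List String) : List String :=
  month_list.foldl (fun day_month month =>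
    pvDayChars.foldl (fun acc day =>
      if PySem.Chars.isIn [day] month.toList then acc ++ [month] else acc) day_month) []

-- ===== PORT B =====
def get_day_month_alt (month_list : List String) : List String :=
  let counts : PySem.Dict Char Int :=
    pvDayChars.foldl (fun d ch => d.insert ch (d.getD ch 0 + 1)) PySem.Dict.empty
  month_list.foldl (fun day_month month =>
    let n : Int := counts.items.foldl
      (fun n p => if PySem.Chars.isIn [p.1] month.toList then n + p.2 else n) 0
    day_month ++ PySem.List.pyRepeat [month] n) []

-- ===== PRECONDITION & SPEC =====
def Spec_get_day_month (month_list : List String) (out : List String) : Prop := out = get_day_month_alt month_list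
instance (month_list : List String) (out : List String) : Decidable (Spec_get_day_month month_list out) := by unfold Spec_get_day_month; infer_instance

-- ===== CLAIM (what is proved, stated in full; the proofs are below) =====
def Claim_equal_get_day_month : Prop := ∀ (month_list : List String), Dom_get_day_month month_list → Spec_get_day_month month_list (get_day_month month_list)

-- ===== LEMMAS AND PROOFS =====

-- a nodup list summing a single-spike function picks out the spike
theorem pv_sum_spike (x : Char) (a : Int) :
    ∀ (S : List Char), S.Nodup → x ∈ S →
      (S.map (fun k => if k = x then a else 0)).sum = a := by
  intro S
  induction S with
  | nil => intro _ hx; cases hx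
  | cons y S ih =>
    intro hnd hx
    rcases List.nodup_cons.mp hnd with ⟨hy, hS⟩
    by_cases h : y = x
    · subst h
      have hz : (S.map (fun k => if k = y then a else 0)).sum = 0 := by
        rw [List.sum_eq_zero]
        intro z hz
        rcases List.mem_map.mp hz with ⟨k, hk, rfl⟩
        have : k ≠ y := fun e => hy (e ▸ hk)
        simp [this]
      simp [hz]
    · have hx' : x ∈ S := by
        rcases hx with _ | hx
        · exact absurd rfl h
        · assumption
      simp [h, ih hS hx']

-- the frequency-table sum over distinct chars equals the direct scan count
theorem pv_sum_count (p : Char → Bool) :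
    ∀ (xs S : List Char), S.Nodup → (∀ c ∈ xs, c ∈ S) →
      (S.map (fun k => if p k then (xs.count k : Int) else 0)).sum
        = (xs.countP p : Int) := by
  intro xs
  induction xs with
  | nil => intro S _ _; simp
  | cons x xs ih =>
    intro S hnd hsub
    have hsplit :
        (S.map (fun k => if p k then ((x :: xs).count k : Int) else 0)).sum
          = (S.map (fun k => if p k then (xs.count k : Int) else 0)).sum
            + (S.map (fun k => if k = x then (if p x then (1 : Int) else 0) else 0)).sum := by
      rw [← PySem.List.sum_map_add_int]
      apply congrArg
      apply List.map_congr_left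
      intro k hk
      by_cases hkx : k = x
      · subst hkx
        by_cases hp : p k <;> simp [hp]
      · have : (x :: xs).count k = xs.count k := by
          simp [Ne.symm hkx]
        simp [this, hkx]
    rw [hsplit, ih S hnd (fun c hc => hsub c (List.mem_cons_of_mem x hc)),
        pv_sum_spike x _ S hnd (hsub x List.mem_cons_self)]
    by_cases hp : p x <;> simp [hp]

-- per month, A's inner scan appends exactly what B's weighted extend appends
theorem pv_step (month : String) (acc : List String) :
    pvDayChars.foldl (fun a day =>
        if PySem.Chars.isIn [day] month.toList then a ++ [month] else a) acc
      = acc ++ PySem.List.pyRepeat [month]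
          ((pvDayChars.foldl (fun d ch => d.insert ch (d.getD ch 0 + 1))
              PySem.Dict.empty).items.foldl
            (fun n p => if PySem.Chars.isIn [p.1] month.toList then n + p.2 else n) 0) := by
  rw [PySem.List.foldl_append_if (p := fun day => PySem.Chars.isIn [day] month.toList)
        (f := fun _ => month),
      PySem.Dict.foldl_insert_getD_add_one_eq_counter, PySem.Dict.items_counter,
      List.foldl_map]
  dsimp only
  rw [PySem.List.foldl_congr_mem (PySem.Set.ofList pvDayChars)
        (fun (x : Int) (y : Char) =>
          if PySem.Chars.isIn [y] month.toList then x + (pvDayChars.count y : Int) else x)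
        (fun (n : Int) (k : Char) =>
          n + (if PySem.Chars.isIn [k] month.toList then (pvDayChars.count k : Int) else 0))
        0
        (by intro n k _; by_cases h : PySem.Chars.isIn [k] month.toList <;> simp [h]),
      PySem.List.foldl_add,
      pv_sum_count _ pvDayChars (PySem.Set.ofList pvDayChars)
        (PySem.Set.nodup_ofList pvDayChars) (fun c hc => (PySem.Set.mem_ofList pvDayChars c).mpr hc),
      PySem.List.pyRepeat_singleton]
  simp [List.map_const', List.countP_eq_length_filter]

-- ===== VERDICT (by name: the statement is the Claim_ definition above) =====
theorem get_day_month_spec : Claim_equal_get_day_month := by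
  intro month_list _
  unfold Spec_get_day_month get_day_month get_day_month_alt
  dsimp only
  exact congrArg (fun f => List.foldl f [] month_list)
    (funext fun acc => funext fun month => pv_step month acc)
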